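-- pv_equiv track=rewrite | github.com/ribhuswatgov/GEEKS_FOR_GEEKS_PYTHON | 1.find_first_set_bit.py | getFirstSetBit
-- ===== SOURCE A (Python) =====
-- def getFirstSetBit(n):
--     data = False
--     index = 1
--     if n == 0:
--         return 0
--         data = True
--
--     while data is False:
--         if n & (1<<index-1) == 0:
--             index+=1
--             continue
--         else:
--             return index
-- ===== SOURCE B (Python) =====
-- def getFirstSetBit(n):
--     # Closed form: n & -n isolates the lowest set bit (two's complement),
--     # bit_length then gives its one-indexed position (zero when nothing is set).
--     return (n & -n).bit_length()
-- ===== Notes on version B (the rewrite author's own statement) =====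
-- stated objective: idiomatic
-- what changed: Replaces the per-bit while loop with the closed form (n & -n).bit_length(): n & -n isolates the lowest set bit under two's complement and bit_length gives its one-indexed position, with the zero case falling out for free.
import Mathlib
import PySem

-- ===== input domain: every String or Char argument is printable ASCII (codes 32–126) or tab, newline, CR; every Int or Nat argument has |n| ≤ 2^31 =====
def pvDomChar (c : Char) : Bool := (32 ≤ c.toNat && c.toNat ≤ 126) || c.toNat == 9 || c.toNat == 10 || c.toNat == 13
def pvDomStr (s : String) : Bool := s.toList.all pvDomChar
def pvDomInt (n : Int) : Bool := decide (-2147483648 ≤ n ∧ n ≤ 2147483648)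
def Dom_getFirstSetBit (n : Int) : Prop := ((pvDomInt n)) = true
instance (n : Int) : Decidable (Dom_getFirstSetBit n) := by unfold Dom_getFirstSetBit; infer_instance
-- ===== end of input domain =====

-- B replaces A's per-bit while loop by the closed form (n & -n).bit_length().


-- ===== PORT A =====
-- the `while data is False` loop; `data` never changes, so the loop runs until `return index`.
-- Fuel is a totality guard only: on the stated domain the lowest set bit has index ≤ 32 < 64.
def fsbLoop (n : Int) : Int → Nat → Int
  | _, 0 => 0
  | index, fuel + 1 =>
    -- Python: if n & (1 << index-1) == 0: index += 1; continue / else: return index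
    if Int.land n (1 <<< (index - 1)) = 0 then fsbLoop n (index + 1) fuel else index

def getFirstSetBit (n : Int) : Int :=
  if n = 0 then 0 else fsbLoop n 1 64

-- ===== PORT B =====
-- Python int.bit_length(): 0 for 0, otherwise floor(log2 |m|) + 1 — exact for every int.
def pyBitLength (m : Int) : Int :=
  if m = 0 then 0 else ((m.natAbs.log2 + 1 : Nat) : Int)

def getFirstSetBit_alt (n : Int) : Int :=
  pyBitLength (Int.land n (-n))

-- ===== PRECONDITION & SPEC =====
def Spec_getFirstSetBit (n : Int) (out : Int) : Prop := out = getFirstSetBit_alt n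
instance (n : Int) (out : Int) : Decidable (Spec_getFirstSetBit n out) := by unfold Spec_getFirstSetBit; infer_instance

-- ===== CLAIM (what is proved, stated in full; the proofs are below) =====
def Claim_equal_getFirstSetBit : Prop := ∀ (n : Int), Dom_getFirstSetBit n → Spec_getFirstSetBit n (getFirstSetBit n)

-- ===== LEMMAS AND PROOFS =====

-- A natural number whose bits are (b && i = j) is `if b then 2^j else 0`.
lemma pvNatSingleBit (y j : ℕ) (b : Bool) (h : ∀ i, y.testBit i = (b && decide (j = i))) :
    y = if b then 2 ^ j else 0 := by
  apply Nat.eq_of_testBit_eq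
  intro i
  rw [h]
  cases b <;> simp [Nat.testBit_two_pow, Nat.zero_testBit]

lemma pvLandTwoPow (n : Int) (j : ℕ) :
    Int.land n ((2 ^ j : ℕ) : Int) = if n.testBit j then ((2 ^ j : ℕ) : Int) else 0 := by
  cases n with
  | ofNat a =>
    rw [show Int.land (Int.ofNat a) ((2 ^ j : ℕ) : Int) = Int.ofNat (a &&& 2 ^ j) from rfl,
      Nat.and_two_pow, show Int.testBit (Int.ofNat a) j = a.testBit j from rfl]
    cases hb : a.testBit j <;> simp
  | negSucc a =>
    rw [show Int.land (Int.negSucc a) ((2 ^ j : ℕ) : Int) = Int.ofNat (Nat.ldiff (2 ^ j) a) from rfl,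
      show Int.testBit (Int.negSucc a) j = !a.testBit j from rfl,
      pvNatSingleBit (Nat.ldiff (2 ^ j) a) j (!a.testBit j) ?_]
    · cases hb : a.testBit j <;> simp
    · intro i
      rw [Nat.testBit_ldiff, Nat.testBit_two_pow]
      by_cases hij : j = i
      · subst hij; simp
      · simp [hij]

lemma pvLandLnot (m : Int) : Int.land m (Int.lnot m) = 0 := by
  have hz : ∀ a : ℕ, Nat.ldiff a a = 0 := by
    intro a
    apply Nat.eq_of_testBit_eq
    intro i
    simp [Nat.testBit_ldiff, Nat.zero_testBit]
  cases m with
  | ofNat a =>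
    rw [show Int.lnot (Int.ofNat a) = Int.negSucc a from rfl,
      show Int.land (Int.ofNat a) (Int.negSucc a) = Int.ofNat (Nat.ldiff a a) from rfl, hz]
    rfl
  | negSucc a =>
    rw [show Int.lnot (Int.negSucc a) = Int.ofNat a from rfl,
      show Int.land (Int.negSucc a) (Int.ofNat a) = Int.ofNat (Nat.ldiff a a) from rfl, hz]
    rfl

-- every nonzero integer has a set bit (two's complement)
lemma pvExistsTestBit (n : Int) (h : n ≠ 0) : ∃ i, n.testBit i = true := by
  cases n with
  | ofNat a =>
    have ha : a ≠ 0 := by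
      intro hc; exact h (by simp [hc])
    by_contra hc
    refine ha (Nat.eq_of_testBit_eq fun i => ?_)
    rw [Nat.zero_testBit]
    exact Bool.eq_false_iff.mpr fun ht => hc ⟨i, ht⟩
  | negSucc a =>
    refine ⟨a, ?_⟩
    rw [show Int.testBit (Int.negSucc a) a = !a.testBit a from rfl,
      Nat.testBit_lt_two_pow (Nat.lt_two_pow_self)]
    rfl

-- A's loop returns k+1 when k is the lowest set bit and fuel suffices.
lemma pvLoop_eq (n : Int) (k : ℕ) (hk : n.testBit k = true)
    (hlow : ∀ i, i < k → n.testBit i = false) :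
    ∀ fuel j, j ≤ k → k - j < fuel → fsbLoop n ((j : Int) + 1) fuel = (k : Int) + 1 := by
  intro fuel
  induction fuel with
  | zero => intro j hj hf; omega
  | succ f ih =>
    intro j hj hf
    rw [fsbLoop, show ((j : Int) + 1) - 1 = (j : Int) from by ring, Int.one_shiftLeft, pvLandTwoPow]
    by_cases hbj : n.testBit j = true
    · have hjk : j = k := by
        rcases Nat.lt_or_ge j k with h | h
        · rw [hlow j h] at hbj; cases hbj
        · omega
      subst hjk
      simp [hbj]
    · have hbj' : n.testBit j = false := Bool.eq_false_iff.mpr hbj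
      have hjk : j < k := by
        by_contra hc
        have hek : j = k := by omega
        rw [hek, hk] at hbj'
        cases hbj'
      rw [if_pos (by simp [hbj']),
        show ((j : Int) + 1) + 1 = ((j + 1 : ℕ) : Int) + 1 from by push_cast; ring]
      exact ih (j + 1) (by omega) (by omega)

-- B's core identity: n & -n = 2^k for the lowest set bit k of n.
lemma pvLandNegSelf (a : ℕ) : ∀ (n : Int), n.natAbs = a → n ≠ 0 →
    ∀ k, n.testBit k = true → (∀ i, i < k → n.testBit i = false) →
    Int.land n (-n) = ((2 ^ k : ℕ) : Int) := by
  induction a using Nat.strong_induction_on with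
  | _ a ih =>
    intro n hna hn0 k hk hlow
    cases k with
    | zero =>
      -- n is odd: n = bit true m, -n = bit true (lnot m)
      obtain ⟨m, hm1, hm2⟩ : ∃ m, n = Int.bit true m ∧ -n = Int.bit true (Int.lnot m) := by
        cases n with
        | ofNat b =>
          rw [show Int.testBit (Int.ofNat b) 0 = b.testBit 0 from rfl, Nat.testBit_zero] at hk
          obtain ⟨c, hc⟩ : ∃ c, b = 2 * c + 1 := ⟨b / 2, by simp at hk; omega⟩
          refine ⟨(c : Int), ?_, ?_⟩
          · simp only [Int.bit_val, Bool.cond_true, hc, Int.ofNat_eq_natCast]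
            push_cast; ring
          · rw [show Int.lnot (c : Int) = Int.negSucc c from rfl]
            simp only [Int.bit_val, Bool.cond_true, hc, Int.negSucc_eq, Int.ofNat_eq_natCast]
            push_cast; ring
        | negSucc b =>
          rw [show Int.testBit (Int.negSucc b) 0 = !b.testBit 0 from rfl] at hk
          have hb0 : b.testBit 0 = false := by
            cases hb : b.testBit 0
            · rfl
            · rw [hb] at hk; cases hk
          rw [Nat.testBit_zero] at hb0
          obtain ⟨c, hc⟩ : ∃ c, b = 2 * c := ⟨b / 2, by simp at hb0; omega⟩
          refine ⟨Int.negSucc c, ?_, ?_⟩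
          · simp only [Int.bit_val, Bool.cond_true, hc, Int.negSucc_eq]
            push_cast; ring
          · rw [show Int.lnot (Int.negSucc c) = Int.ofNat c from rfl]
            simp only [Int.bit_val, Bool.cond_true, hc, Int.negSucc_eq, Int.ofNat_eq_natCast]
            push_cast; ring
      rw [hm1] at hm2 ⊢
      rw [hm2, Int.land_bit, pvLandLnot]
      simp [Int.bit_val]
    | succ j =>
      -- n is even: n = 2 * m, recurse on m
      have h0 : n.testBit 0 = false := hlow 0 (Nat.succ_pos j)
      obtain ⟨m, hm⟩ : ∃ m, n = 2 * m := by
        cases n with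
        | ofNat b =>
          rw [show Int.testBit (Int.ofNat b) 0 = b.testBit 0 from rfl, Nat.testBit_zero] at h0
          obtain ⟨c, hc⟩ : ∃ c, b = 2 * c := ⟨b / 2, by simp at h0; omega⟩
          exact ⟨(c : Int), by simp only [hc, Int.ofNat_eq_natCast]; push_cast; ring⟩
        | negSucc b =>
          rw [show Int.testBit (Int.negSucc b) 0 = !b.testBit 0 from rfl] at h0
          have hb0 : b.testBit 0 = true := by
            cases hb : b.testBit 0
            · rw [hb] at h0; cases h0
            · rfl
          rw [Nat.testBit_zero] at hb0
          obtain ⟨c, hc⟩ : ∃ c, b = 2 * c + 1 := ⟨b / 2, by simp at hb0; omega⟩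
          exact ⟨Int.negSucc c, by simp only [hc, Int.negSucc_eq]; push_cast; ring⟩
      have hbit : n = Int.bit false m := by rw [hm]; simp [Int.bit_val]
      have hm0 : m ≠ 0 := by
        intro hc; rw [hc, mul_zero] at hm; exact hn0 hm
      have hmna : m.natAbs < a := by
        rw [← hna, hm]
        simp [Int.natAbs_mul]
        omega
      have hb : ∀ i, m.testBit i = n.testBit (i + 1) := by
        intro i
        rw [hbit, Int.testBit_bit_succ]
      have hrec := ih m.natAbs hmna m rfl hm0 j
        (by rw [hb]; exact hk)
        (by intro i hi; rw [hb]; exact hlow (i + 1) (by omega))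
      have hneg : -n = Int.bit false (-m) := by
        simp only [hm, Int.bit_val, Bool.cond_false]; ring
      rw [hneg, hbit, Int.land_bit, hrec]
      simp [Int.bit_val]
      ring

-- ===== VERDICT (by name: the statement is the Claim_ definition above) =====
theorem getFirstSetBit_spec : Claim_equal_getFirstSetBit := by
  intro n hdom
  unfold Spec_getFirstSetBit getFirstSetBit getFirstSetBit_alt
  by_cases h0 : n = 0
  · subst h0
    simp [pyBitLength, show Int.land 0 0 = 0 from rfl]
  · have hex : ∃ i, n.testBit i = true := pvExistsTestBit n h0
    set k := Nat.find hex with hkdef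
    have hk : n.testBit k = true := Nat.find_spec hex
    have hlow : ∀ i, i < k → n.testBit i = false := by
      intro i hi
      exact Bool.eq_false_iff.mpr (Nat.find_min hex hi)
    -- on the domain the lowest set bit has index ≤ 31
    have hdom' : -2147483648 ≤ n ∧ n ≤ 2147483648 := by
      have := hdom
      unfold Dom_getFirstSetBit pvDomInt at this
      exact of_decide_eq_true this
    have hk31 : k ≤ 31 := by
      cases n with
      | ofNat b =>
        have hb : b ≤ 2147483648 := by
          have h := hdom'.2
          rw [Int.ofNat_eq_natCast] at h
          exact_mod_cast h
        have h2k : 2 ^ k ≤ b := Nat.ge_two_pow_of_testBit hk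
        by_contra hc
        have h32 : (2 : ℕ) ^ 32 ≤ 2 ^ k := Nat.pow_le_pow_right (by norm_num) (by omega)
        have : (2 : ℕ) ^ 32 = 4294967296 := by norm_num
        omega
      | negSucc b =>
        have hb : b < 2147483648 := by
          have := hdom'.1
          rw [Int.negSucc_eq] at this
          omega
        have hb2 : b < 2 ^ 31 := by
          have : (2 : ℕ) ^ 31 = 2147483648 := by norm_num
          omega
        have h31 : Int.testBit (Int.negSucc b) 31 = true := by
          rw [show Int.testBit (Int.negSucc b) 31 = !b.testBit 31 from rfl,
            Nat.testBit_lt_two_pow hb2]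
          rfl
        exact Nat.find_min' hex h31
    have hA : fsbLoop n 1 64 = (k : Int) + 1 := by
      have := pvLoop_eq n k hk hlow 64 0 (by omega) (by omega)
      simpa using this
    rw [if_neg h0, hA, pvLandNegSelf n.natAbs n rfl h0 k hk hlow, pyBitLength]
    rw [if_neg (by positivity)]
    simp [Nat.log2_two_pow]
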